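-- pv_equiv track=rewrite | github.com/haesol1013/2024-1_PS_intermediate | 1_simulation/3_격자 안에서 터지고 떨어지는 경우/3_1차원 폭발 게임.py | explode_bombs
-- ===== SOURCE A (Python) =====
-- def explode_bombs(n, m, bombs):
--     while True:
--         new_bombs = []
--         i = 0
--         exploded = False
--
--         while i < len(bombs):
--             start = i
--             while i < len(bombs) and bombs[start] == bombs[i]:
--                 i += 1
--
--             if i - start >= m:
--                 exploded = True
--             else:
--                 new_bombs.extend(bombs[start:i])
--
--         if not exploded:
--             break
--
--         bombs = new_bombs
--
--     return bombs
-- ===== SOURCE B (Python) =====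
-- def explode_bombs(n, m, bombs):
--     # run-length encode once, then do explosion passes on (value, count) runs
--     runs = []
--     for x in bombs:
--         if runs and runs[-1][0] == x:
--             runs[-1] = (x, runs[-1][1] + 1)
--         else:
--             runs.append((x, 1))
--     while any(c >= m for _, c in runs):
--         new_runs = []
--         for v, c in runs:
--             if c >= m:
--                 continue
--             if new_runs and new_runs[-1][0] == v:
--                 new_runs[-1] = (v, new_runs[-1][1] + c)
--             else:
--                 new_runs.append((v, c))
--         runs = new_runs
--     return [v for v, c in runs for _ in range(c)]
-- ===== Notes on version B (the rewrite author's own statement) =====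
-- stated objective: alternative
-- what changed: B run-length-encodes the list once and performs the explosion passes on (value,count) runs (dropping runs with count >= m and merging adjacent equal survivors), decoding back to elements only at the end, instead of A's per-pass rescan and rebuild of the whole element list.
import Mathlib
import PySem

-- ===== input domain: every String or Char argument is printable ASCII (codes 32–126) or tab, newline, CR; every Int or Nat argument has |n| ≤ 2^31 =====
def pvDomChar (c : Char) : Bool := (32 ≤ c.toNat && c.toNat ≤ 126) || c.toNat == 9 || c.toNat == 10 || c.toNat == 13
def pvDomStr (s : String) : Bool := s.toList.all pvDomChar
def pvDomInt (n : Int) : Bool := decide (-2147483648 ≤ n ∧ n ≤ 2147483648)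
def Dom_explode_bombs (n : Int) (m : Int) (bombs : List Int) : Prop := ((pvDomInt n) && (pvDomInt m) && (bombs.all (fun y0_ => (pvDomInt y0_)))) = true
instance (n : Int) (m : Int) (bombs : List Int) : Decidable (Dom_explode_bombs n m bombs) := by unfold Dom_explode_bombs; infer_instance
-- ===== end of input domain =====

-- B replaces A's repeated whole-list rescan-and-rebuild passes by the same explosion
-- passes over a run-length encoding built once: each pass touches only the
-- (value,count) runs, and elements are materialised again only at the end.
-- Loops are ported with a structural fuel argument that only bounds the iteration
-- count (each loop consumes at least one unit of its bound per step, so the stated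
-- fuel is always sufficient); it is a totality guard, not an algorithm change.

-- ===== PORT A =====

-- inner while: 'while i < len(bombs) and bombs[start] == bombs[i]: i += 1'
-- (bombs.getD is exact here: both indices are in range whenever Python reads them;
--  fuel: the loop advances i by one per step and stops at len(bombs) at the latest)
def runEnd (bombs : List Int) (start : Nat) : Nat → Nat → Nat
  | 0, i => i
  | fuel + 1, i =>
    if i < bombs.length ∧ bombs.getD start 0 = bombs.getD i 0 then
      runEnd bombs start fuel (i + 1)
    else i

-- middle while: one pass; newBombs/exploded are Python's accumulators
-- (fuel: each iteration advances i by at least one, so len(bombs) - i bounds the steps)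
def passLoop (m : Int) (bombs : List Int) : Nat → Nat → List Int → Bool → List Int × Bool
  | 0, _, newBombs, exploded => (newBombs, exploded)
  | fuel + 1, i, newBombs, exploded =>
    if i < bombs.length then
      let start := i
      let i' := runEnd bombs start (bombs.length - start) start
      if m ≤ (i' : Int) - (start : Int) then
        passLoop m bombs fuel i' newBombs true
      else
        passLoop m bombs fuel i' (newBombs ++ PySem.List.slice bombs (some (start : Int)) (some (i' : Int))) exploded
    else
      (newBombs, exploded)

-- outer 'while True' loop of A
-- (fuel: every pass that explodes strictly shortens bombs, so len(bombs)+1 passes suffice)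
def explodeLoop (n : Int) (m : Int) : Nat → List Int → List Int
  | 0, bombs => bombs
  | fuel + 1, bombs =>
    let r := passLoop m bombs bombs.length 0 [] false
    if r.2 then explodeLoop n m fuel r.1 else bombs

def explode_bombs (n : Int) (m : Int) (bombs : List Int) : List Int :=
  explodeLoop n m (bombs.length + 1) bombs

-- ===== PORT B =====

-- Source B's run-length-encoding loop; the accumulator keeps the runs REVERSED
-- (head = Python's runs[-1]), reversed back afterwards
def pushRun (x : Int) (runs : List (Int × Int)) : List (Int × Int) :=
  match runs with
  | (v, c) :: rest => if v = x then (v, c + 1) :: rest else (x, 1) :: (v, c) :: rest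
  | [] => [(x, 1)]

def encodeRuns (bombs : List Int) : List (Int × Int) :=
  (bombs.foldl (fun a x => pushRun x a) []).reverse

-- one explosion pass over the runs: drop runs with count ≥ m, merge adjacent equal
-- survivors; new_runs kept reversed (head = Python's new_runs[-1])
def mergeStep (m : Int) (acc : List (Int × Int)) (p : Int × Int) : List (Int × Int) :=
  if m ≤ p.2 then acc
  else
    match acc with
    | (u, d) :: rest => if u = p.1 then (u, d + p.2) :: rest else p :: (u, d) :: rest
    | [] => [p]

def passB (m : Int) (runs : List (Int × Int)) : List (Int × Int) :=
  (runs.foldl (mergeStep m) []).reverse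

-- Source B's 'while any(...)' loop
-- (fuel: every pass removes at least one run, so len(runs)+1 passes suffice)
def loopB (m : Int) : Nat → List (Int × Int) → List (Int × Int)
  | 0, runs => runs
  | fuel + 1, runs =>
    if runs.any (fun p => m ≤ p.2) then loopB m fuel (passB m runs) else runs

-- final list comprehension: [v for v, c in runs for _ in range(c)]
def decodeRuns (runs : List (Int × Int)) : List Int :=
  runs.flatMap (fun p => List.replicate p.2.toNat p.1)

def explode_bombs_alt (n : Int) (m : Int) (bombs : List Int) : List Int :=
  decodeRuns (loopB m ((encodeRuns bombs).length + 1) (encodeRuns bombs))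

-- ===== PRECONDITION & SPEC =====
def Spec_explode_bombs (n : Int) (m : Int) (bombs : List Int) (out : List Int) : Prop := out = explode_bombs_alt n m bombs
instance (n : Int) (m : Int) (bombs : List Int) (out : List Int) : Decidable (Spec_explode_bombs n m bombs out) := by unfold Spec_explode_bombs; infer_instance

-- ===== CLAIM (what is proved, stated in full; the proofs are below) =====
def Claim_equal_explode_bombs : Prop := ∀ (n : Int) (m : Int) (bombs : List Int), Dom_explode_bombs n m bombs → Spec_explode_bombs n m bombs (explode_bombs n m bombs)

-- ===== LEMMAS AND PROOFS =====

-- a well-formed run list: positive counts, adjacent runs carry distinct values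
def Good (runs : List (Int × Int)) : Prop :=
  (∀ p ∈ runs, 1 ≤ p.2) ∧ runs.IsChain (fun p q => p.1 ≠ q.1)

theorem good_reverse (runs : List (Int × Int)) : Good runs.reverse ↔ Good runs := by
  unfold Good
  rw [List.isChain_reverse]
  constructor
  · rintro ⟨h1, h2⟩
    exact ⟨fun p hp => h1 p (List.mem_reverse.mpr hp), h2.imp fun _ _ h => Ne.symm h⟩
  · rintro ⟨h1, h2⟩
    exact ⟨fun p hp => h1 p (List.mem_reverse.mp hp), h2.imp fun _ _ h => Ne.symm h⟩

theorem decode_append (s t : List (Int × Int)) :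
    decodeRuns (s ++ t) = decodeRuns s ++ decodeRuns t := by
  unfold decodeRuns; simp

theorem good_nil : Good (List.reverse ([] : List (Int × Int))) := by
  rw [List.reverse_nil]
  exact ⟨by simp, List.isChain_nil⟩

theorem decode_nil : decodeRuns ([] : List (Int × Int)) = [] := by
  simp [decodeRuns]

theorem pushRun_spec (x : Int) (s : List (Int × Int)) (hg : Good s.reverse) :
    Good ((pushRun x s).reverse) ∧
    decodeRuns ((pushRun x s).reverse) = decodeRuns s.reverse ++ [x] := by
  cases s with
  | nil =>
    constructor
    · rw [good_reverse]
      exact ⟨by simp [pushRun], by simp [pushRun]⟩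
    · simp [pushRun, decodeRuns]
  | cons p rest =>
    obtain ⟨v, c⟩ := p
    rw [good_reverse] at hg
    obtain ⟨hpos, hch⟩ := hg
    have hc : 1 ≤ c := hpos (v, c) (by simp)
    simp only [pushRun]
    split
    · next hv =>
      subst hv
      constructor
      · rw [good_reverse]
        refine ⟨?_, ?_⟩
        · intro p hp
          rcases List.mem_cons.mp hp with h | h
          · subst h; simp; omega
          · exact hpos p (by simp [h])
        · rw [List.isChain_cons] at hch ⊢
          exact ⟨fun q hq => hch.1 q hq, hch.2⟩
      · simp only [List.reverse_cons, decode_append, List.append_assoc]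
        congr 1
        have hct : (c + 1).toNat = c.toNat + 1 := by omega
        simp [decodeRuns, hct, List.replicate_succ']
    · next hv =>
      constructor
      · rw [good_reverse]
        refine ⟨?_, ?_⟩
        · intro p hp
          rcases List.mem_cons.mp hp with h | h
          · subst h; simp
          · exact hpos p h
        · rw [List.isChain_cons]
          refine ⟨fun q hq => ?_, hch⟩
          simp at hq
          subst hq
          simpa using Ne.symm hv
      · simp [List.reverse_cons, decodeRuns]

theorem encode_aux (bombs : List Int) (s : List (Int × Int)) (hg : Good s.reverse) :
    Good ((bombs.foldl (fun a x => pushRun x a) s).reverse) ∧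
    decodeRuns ((bombs.foldl (fun a x => pushRun x a) s).reverse) = decodeRuns s.reverse ++ bombs := by
  induction bombs generalizing s with
  | nil => simpa using hg
  | cons x bombs ih =>
    simp only [List.foldl_cons]
    have key := pushRun_spec x s hg
    rcases ih (pushRun x s) key.1 with ⟨g2, d2⟩
    exact ⟨g2, by rw [d2, key.2, List.append_assoc]; rfl⟩

theorem encode_spec (bombs : List Int) :
    Good (encodeRuns bombs) ∧ decodeRuns (encodeRuns bombs) = bombs := by
  have h := encode_aux bombs [] good_nil
  unfold encodeRuns
  refine ⟨h.1, ?_⟩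
  rw [h.2, List.reverse_nil, decode_nil, List.nil_append]

-- bombs[j] through the tail of the list
theorem getD_of_drop (bombs : List Int) (j : Nat) :
    bombs.getD j 0 = (bombs.drop j).headD 0 := by
  rw [List.getD_eq_getElem?_getD, List.headD_eq_head?_getD, List.head?_eq_getElem?,
    List.getElem?_drop, Nat.add_zero]

theorem runEnd_eq (bombs : List Int) (start : Nat) (v : Int)
    (hstart : bombs.getD start 0 = v) :
    ∀ (k : Nat) (fuel : Nat) (j : Nat) (suf : List Int),
    bombs.drop j = List.replicate k v ++ suf →
    suf.head? ≠ some v → k ≤ fuel → runEnd bombs start fuel j = j + k := by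
  intro k
  induction k with
  | zero =>
    intro fuel j suf hdrop hsuf _
    cases fuel with
    | zero => simp [runEnd]
    | succ fuel =>
      simp only [runEnd]
      rw [if_neg, Nat.add_zero]
      rintro ⟨hj, heq⟩
      apply hsuf
      rw [hstart] at heq
      have hd : bombs.drop j = suf := by simpa using hdrop
      have hh : bombs.getD j 0 = suf.headD 0 := by rw [getD_of_drop, hd]
      rw [← heq] at hh
      match suf, hd with
      | [], hd =>
        exfalso
        have : bombs.length ≤ j := by rw [← List.drop_eq_nil_iff]; exact hd
        omega
      | y :: suf', _ => simp at hh ⊢; omega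
  | succ k ih =>
    intro fuel j suf hdrop hsuf hfuel
    have hj : j < bombs.length := by
      have := congrArg List.length hdrop
      simp at this
      omega
    have hget : bombs.getD j 0 = v := by
      rw [getD_of_drop, hdrop]
      simp [List.replicate_succ]
    match fuel, hfuel with
    | fuel + 1, hfuel =>
      simp only [runEnd]
      rw [if_pos ⟨hj, by rw [hstart, hget]⟩]
      have hdrop' : bombs.drop (j + 1) = List.replicate k v ++ suf := by
        have h1 : bombs.drop (j + 1) = (bombs.drop j).drop 1 := by
          rw [List.drop_drop]
        rw [h1, hdrop, List.replicate_succ]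
        simp
      rw [ih fuel (j + 1) suf hdrop' hsuf (by omega)]
      omega

-- the decoding of a run list whose head value differs from v cannot start with v
theorem decode_head_ne (rest : List (Int × Int)) (v : Int)
    (hpos : ∀ p ∈ rest, 1 ≤ p.2)
    (hne : ∀ q ∈ rest.head?, (q : Int × Int).1 ≠ v) :
    (decodeRuns rest).head? ≠ some v := by
  match rest with
  | [] => simp [decodeRuns]
  | (u, c) :: rest' =>
    have hc : 1 ≤ c := hpos (u, c) (by simp)
    have hu : u ≠ v := hne (u, c) (by simp)
    unfold decodeRuns
    simp only [List.flatMap_cons]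
    have hct : c.toNat = (c.toNat - 1) + 1 := by omega
    rw [hct, List.replicate_succ]
    simpa using hu

-- pass characterization of A's middle loop over a Good run decomposition of the tail
theorem passLoop_spec (m : Int) (bombs : List Int) :
    ∀ (runs : List (Int × Int)) (fuel : Nat) (i : Nat) (acc : List Int) (ex : Bool),
    Good runs → bombs.drop i = decodeRuns runs → i ≤ bombs.length →
    bombs.length - i ≤ fuel →
    passLoop m bombs fuel i acc ex =
      (acc ++ decodeRuns (runs.filter (fun p => decide (p.2 < m))),
       ex || runs.any (fun p => m ≤ p.2)) := by
  intro runs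
  induction runs with
  | nil =>
    intro fuel i acc ex _ hdrop hle _
    have hlen : bombs.length ≤ i := by
      rw [← List.drop_eq_nil_iff, hdrop]
      simp [decodeRuns]
    cases fuel with
    | zero => simp [passLoop, decodeRuns]
    | succ fuel =>
      simp only [passLoop]
      rw [if_neg (by omega)]
      simp [decodeRuns]
  | cons p rest ih =>
    rintro fuel i acc ex ⟨hpos, hch⟩ hdrop hle hfuel
    obtain ⟨v, c⟩ := p
    have hc : 1 ≤ c := hpos (v, c) (by simp)
    have hdrop' : bombs.drop i = List.replicate c.toNat v ++ decodeRuns rest := by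
      rw [hdrop]; simp [decodeRuns]
    have hlen : bombs.length - i = c.toNat + (decodeRuns rest).length := by
      rw [← List.length_drop, hdrop']
      simp
    have hct1 : 1 ≤ c.toNat := by omega
    have hi : i < bombs.length := by omega
    have hget : bombs.getD i 0 = v := by
      rw [getD_of_drop, hdrop']
      have hct : c.toNat = (c.toNat - 1) + 1 := by omega
      rw [hct, List.replicate_succ]
      simp
    rw [List.isChain_cons] at hch
    have hhead : (decodeRuns rest).head? ≠ some v :=
      decode_head_ne rest v (fun q hq => hpos q (by simp [hq]))
        (fun q hq => (hch.1 q hq).symm)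
    have hre : runEnd bombs i (bombs.length - i) i = i + c.toNat :=
      runEnd_eq bombs i v hget c.toNat (bombs.length - i) i (decodeRuns rest) hdrop' hhead
        (by omega)
    have hdroprest : bombs.drop (i + c.toNat) = decodeRuns rest := by
      have h1 : bombs.drop (i + c.toNat) = (bombs.drop i).drop c.toNat := by
        rw [List.drop_drop]
      rw [h1, hdrop']
      rw [List.drop_left' (by simp)]
    have hlen' : i + c.toNat ≤ bombs.length := by omega
    have hcast : ((i + c.toNat : Nat) : Int) - ((i : Nat) : Int) = c := by
      push_cast; omega
    cases fuel with
    | zero => omega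
    | succ fuel =>
      simp only [passLoop]
      rw [if_pos hi]
      simp only [hre, hcast]
      split
      · next hm =>
        rw [ih fuel (i + c.toNat) acc true ⟨fun q hq => hpos q (by simp [hq]), hch.2⟩
          hdroprest hlen' (by omega)]
        have hfil : decide ((v, c).2 < m) = false := by simp; omega
        simp [hfil, List.any_cons, show m ≤ c from hm]
      · next hm =>
        have hslice : PySem.List.slice bombs (some ((i : Nat) : Int)) (some ((i + c.toNat : Nat) : Int)) =
            List.replicate c.toNat v := by
          rw [PySem.List.slice_natCast, hdrop']
          rw [List.take_left' (by simp)]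
        rw [hslice,
          ih fuel (i + c.toNat) (acc ++ List.replicate c.toNat v) ex
            ⟨fun q hq => hpos q (by simp [hq]), hch.2⟩ hdroprest hlen' (by omega)]
        have hfil : decide ((v, c).2 < m) = true := by simp; omega
        simp [hfil, List.any_cons, show ¬m ≤ c by omega, decodeRuns]

-- a surviving run merged into the reversed accumulator: decodes to an append, stays Good
theorem mergeStep_spec (m : Int) (p : Int × Int) (acc : List (Int × Int))
    (hg : Good acc.reverse) (hc : 1 ≤ p.2) (hm : ¬ m ≤ p.2) :
    Good ((mergeStep m acc p).reverse) ∧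
    decodeRuns ((mergeStep m acc p).reverse) =
      decodeRuns acc.reverse ++ List.replicate p.2.toNat p.1 := by
  obtain ⟨v, c⟩ := p
  cases acc with
  | nil =>
    simp only [mergeStep]
    rw [if_neg (by simpa using hm)]
    constructor
    · rw [good_reverse]
      exact ⟨by simpa using hc, by simp⟩
    · simp [decodeRuns]
  | cons q rest =>
    obtain ⟨u, d⟩ := q
    rw [good_reverse] at hg
    obtain ⟨hp2, hch2⟩ := hg
    have hd : 1 ≤ d := hp2 (u, d) (by simp)
    simp only [mergeStep]
    rw [if_neg (by simpa using hm)]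
    split
    · next huv =>
      constructor
      · rw [good_reverse]
        refine ⟨?_, ?_⟩
        · intro q hq
          rcases List.mem_cons.mp hq with h | h
          · subst h; simp; omega
          · exact hp2 q (by simp [h])
        · rw [List.isChain_cons] at hch2 ⊢
          exact ⟨fun q hq => hch2.1 q hq, hch2.2⟩
      · simp only [List.reverse_cons, decode_append]
        rw [List.append_assoc]
        congr 1
        have hdc : (d + c).toNat = d.toNat + c.toNat := by omega
        rw [huv]
        simp only [decodeRuns, List.flatMap_cons, List.flatMap_nil, List.append_nil]
        rw [hdc, List.replicate_add]
    · next huv =>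
      constructor
      · rw [good_reverse]
        refine ⟨?_, ?_⟩
        · intro q hq
          rcases List.mem_cons.mp hq with h | h
          · subst h; simpa using hc
          · exact hp2 q h
        · rw [List.isChain_cons]
          refine ⟨fun q hq => ?_, hch2⟩
          simp at hq
          subst hq
          simpa using fun h => huv h.symm
      · simp [List.reverse_cons, decodeRuns]

-- one B pass decodes to the filtered runs, and stays Good
theorem passB_aux (m : Int) (l : List (Int × Int)) :
    ∀ acc : List (Int × Int), Good acc.reverse → (∀ p ∈ l, 1 ≤ p.2) →
    Good ((l.foldl (mergeStep m) acc).reverse) ∧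
    decodeRuns ((l.foldl (mergeStep m) acc).reverse) =
      decodeRuns acc.reverse ++ decodeRuns (l.filter (fun p => decide (p.2 < m))) := by
  induction l with
  | nil => intro acc hg _; simpa [decodeRuns] using hg
  | cons p l ih =>
    intro acc hg hpos
    have hc : 1 ≤ p.2 := hpos p (by simp)
    simp only [List.foldl_cons]
    by_cases hm : m ≤ p.2
    · have hstep : mergeStep m acc p = acc := by simp only [mergeStep]; rw [if_pos hm]
      rw [hstep]
      rcases ih acc hg (fun q hq => hpos q (by simp [hq])) with ⟨g2, d2⟩
      have hfil : decide (p.2 < m) = false := by simp; omega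
      refine ⟨g2, ?_⟩
      rw [d2]
      simp [hfil]
    · have hkey := mergeStep_spec m p acc hg hc hm
      rcases ih (mergeStep m acc p) hkey.1 (fun q hq => hpos q (by simp [hq])) with ⟨g2, d2⟩
      have hfil : decide (p.2 < m) = true := by simp; omega
      refine ⟨g2, ?_⟩
      rw [d2, hkey.2]
      simp [hfil, decodeRuns, List.append_assoc]

theorem passB_spec (m : Int) (runs : List (Int × Int)) (hg : Good runs) :
    Good (passB m runs) ∧
    decodeRuns (passB m runs) = decodeRuns (runs.filter (fun p => decide (p.2 < m))) := by
  have h := passB_aux m runs [] good_nil hg.1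
  unfold passB
  refine ⟨h.1, ?_⟩
  rw [h.2, List.reverse_nil, decode_nil, List.nil_append]

theorem foldl_mergeStep_len (m : Int) (l : List (Int × Int)) (acc : List (Int × Int)) :
    (l.foldl (mergeStep m) acc).length ≤ acc.length + l.countP (fun p => decide (p.2 < m)) := by
  induction l generalizing acc with
  | nil => simp
  | cons p l ih =>
    simp only [List.foldl_cons, List.countP_cons]
    have hstep : (mergeStep m acc p).length ≤ acc.length + (if decide (p.2 < m) = true then 1 else 0) := by
      unfold mergeStep
      split
      · next hm => simp [show ¬ p.2 < m by omega]
      · next hm =>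
        simp only [show (p.2 < m) by omega, decide_true, if_pos]
        match acc with
        | [] => simp
        | (u, d) :: rest => dsimp only; split <;> simp
    calc (l.foldl (mergeStep m) (mergeStep m acc p)).length
        ≤ (mergeStep m acc p).length + l.countP (fun p => decide (p.2 < m)) := ih _
      _ ≤ _ := by omega

theorem passB_len_lt (m : Int) (runs : List (Int × Int))
    (h : runs.any (fun p => m ≤ p.2) = true) : (passB m runs).length < runs.length := by
  unfold passB
  simp only [List.length_reverse]
  have h1 := foldl_mergeStep_len m runs []
  have h2 : runs.countP (fun p => decide (p.2 < m)) < runs.length := by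
    rw [List.any_eq_true] at h
    rcases h with ⟨p, hp, hm⟩
    rcases List.append_of_mem hp with ⟨l1, l2, rfl⟩
    have e1 := List.countP_le_length (l := l1) (p := fun q => decide (q.2 < m))
    have e2 := List.countP_le_length (l := l2) (p := fun q => decide (q.2 < m))
    have hfil : decide (p.2 < m) = false := by simp at hm ⊢; omega
    simp only [List.countP_append, List.countP_cons, List.length_append, List.length_cons, hfil,
      Bool.false_eq_true, if_false]
    omega
  simp only [List.length_nil, Nat.zero_add] at h1
  omega

theorem decode_filter_len_le (l : List (Int × Int)) :
    (decodeRuns (l.filter (fun p => decide (p.2 < m)))).length ≤ (decodeRuns l).length := by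
  induction l with
  | nil => simp
  | cons p l ih =>
    rw [List.filter_cons]
    split
    · simp only [decodeRuns, List.flatMap_cons, List.length_append] at ih ⊢
      omega
    · simp only [decodeRuns, List.flatMap_cons, List.length_append] at ih ⊢
      omega

theorem decode_filter_len_lt (m : Int) (runs : List (Int × Int))
    (hpos : ∀ p ∈ runs, 1 ≤ p.2)
    (h : runs.any (fun p => m ≤ p.2) = true) :
    (decodeRuns (runs.filter (fun p => decide (p.2 < m)))).length < (decodeRuns runs).length := by
  rw [List.any_eq_true] at h
  rcases h with ⟨p, hp, hm⟩
  have hc : 1 ≤ p.2 := hpos p hp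
  rcases List.append_of_mem hp with ⟨l1, l2, rfl⟩
  have hfil : decide (p.2 < m) = false := by simp at hm ⊢; omega
  have e1 := decode_filter_len_le (m := m) l1
  have e2 := decode_filter_len_le (m := m) l2
  rw [List.filter_append, List.filter_cons, hfil]
  simp only [Bool.false_eq_true, if_false, decode_append]
  simp only [List.length_append]
  have hrep : 1 ≤ (List.replicate p.2.toNat p.1).length := by simp; omega
  have hdec : decodeRuns (p :: l2) = List.replicate p.2.toNat p.1 ++ decodeRuns l2 := by
    simp [decodeRuns]
  rw [hdec]
  simp only [List.length_append]
  omega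

-- the two loops agree pass for pass, given enough fuel on both sides
theorem loop_agree (n m : Int) :
    ∀ (fa fb : Nat) (runs : List (Int × Int)), Good runs →
    runs.length < fb → (decodeRuns runs).length < fa →
    explodeLoop n m fa (decodeRuns runs) = decodeRuns (loopB m fb runs) := by
  intro fa
  induction fa with
  | zero => intro fb runs _ _ hfa; omega
  | succ fa ih =>
    intro fb runs hg hfb hfa
    match fb, hfb with
    | fb + 1, hfb =>
      simp only [explodeLoop, loopB]
      rw [passLoop_spec m (decodeRuns runs) runs (decodeRuns runs).length 0 [] false hg
        (by simp) (by simp) (by simp)]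
      simp only [Bool.false_or, List.nil_append]
      cases hany : runs.any (fun p => m ≤ p.2) with
      | true =>
        rw [if_pos rfl, if_pos rfl]
        rcases passB_spec m runs hg with ⟨g2, d2⟩
        rw [← d2]
        apply ih fb (passB m runs) g2
        · have := passB_len_lt m runs hany
          omega
        · rw [d2]
          have := decode_filter_len_lt m runs hg.1 hany
          omega
      | false =>
        rw [if_neg (by simp), if_neg (by exact Bool.false_ne_true)]

-- ===== VERDICT (by name: the statement is the Claim_ definition above) =====
theorem explode_bombs_spec : Claim_equal_explode_bombs := by
  intro n m bombs _
  unfold Spec_explode_bombs explode_bombs_alt explode_bombs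
  rcases encode_spec bombs with ⟨hg, hd⟩
  have h := loop_agree n m (bombs.length + 1) ((encodeRuns bombs).length + 1)
    (encodeRuns bombs) hg (by omega) (by rw [hd]; omega)
  rw [hd] at h
  exact h
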